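-- pv_equiv track=rewrite | github.com/mohamedaminsoumih/ML-exam | solution.py | can_rearrange
-- ===== SOURCE A (Python) =====
-- def can_rearrange(word):
--     """
--     :type word: str
--     :rtype: bool
--     """
--     # Compter les occurrences de chaque caractère
--     counts = {}
--     for char in word:
--         if char in counts:
--             counts[char] += 1
--         else:
--             counts[char] = 1
--
--     # Trouver la fréquence maximale et la longueur du mot
--     max_count = max(counts.values())
--     word_length = len(word)
--
--     # Vérifie si le caractère le plus fréquent peut être réorganisé sans être adjacent
--     return max_count <= (word_length + 1) // 2
-- ===== SOURCE B (Python) =====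
-- def can_rearrange(word):
--     """
--     :type word: str
--     :rtype: bool
--     """
--     # Sort the characters: equal characters become contiguous, so the longest
--     # run of the sorted sequence IS the maximum character frequency.
--     best = 0
--     run = 0
--     prev = None
--     for c in sorted(word):
--         if c == prev:
--             run += 1
--         else:
--             run = 1
--             prev = c
--         if run > best:
--             best = run
--     return best <= (len(word) + 1) // 2
-- ===== Notes on version B (the rewrite author's own statement) =====
-- stated objective: alternative
-- what changed: B builds no counting table at all: it sorts the characters and scans the sorted sequence once for its longest run of equal characters, which equals the maximum character frequency, then compares it with (len+1)//2.
-- crash fix: On the empty string A raises ValueError (max() of an empty dict's values); B's run scan naturally returns True there. — e.g. on can_rearrange(""): A raises ValueError, B returns true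
import Mathlib
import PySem

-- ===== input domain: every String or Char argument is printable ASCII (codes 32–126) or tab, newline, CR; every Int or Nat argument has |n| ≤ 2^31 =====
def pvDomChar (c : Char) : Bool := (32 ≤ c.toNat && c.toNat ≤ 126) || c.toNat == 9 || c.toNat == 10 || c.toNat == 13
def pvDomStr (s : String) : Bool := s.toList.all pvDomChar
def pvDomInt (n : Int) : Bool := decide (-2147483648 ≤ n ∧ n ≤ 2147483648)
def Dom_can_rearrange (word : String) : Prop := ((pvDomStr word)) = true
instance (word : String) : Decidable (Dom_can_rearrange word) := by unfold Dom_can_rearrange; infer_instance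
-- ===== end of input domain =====

-- B replaces A's dict-counting pass by sort + longest-run scan (alternative structure, same results).

-- ===== PORT A =====
def can_rearrange (word : String) : Bool :=
  -- counts = {}; for char in word: if char in counts: counts[char] += 1 else: counts[char] = 1
  let counts : PySem.Dict Char Int := word.toList.foldl
    (fun d c => if d.contains c then d.modify c 0 (fun v => v + 1) else d.insert c 1)
    PySem.Dict.empty
  -- max_count = max(counts.values()); return max_count <= (len(word) + 1) // 2
  match PySem.List.max? counts.values (fun v => v) with
  | none => false   -- Python raises ValueError here; excluded by Pre_
  | some m => decide (m ≤ PySem.Int.floordiv (PySem.Str.len word + 1) 2)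

-- ===== PORT B =====
-- the loop body of Source B's for-loop (state = (best, run, prev))
def pvStepB (st : Int × Int × Option Char) (c : Char) : Int × Int × Option Char :=
  let best := st.1
  let run := st.2.1
  let prev := st.2.2
  -- if c == prev: run += 1 else: run = 1; prev = c
  let rp : Int × Option Char := if prev = some c then (run + 1, prev) else (1, some c)
  -- if run > best: best = run
  let best' : Int := if best < rp.1 then rp.1 else best
  (best', rp.1, rp.2)

def can_rearrange_alt (word : String) : Bool :=
  -- best = 0; run = 0; prev = None; for c in sorted(word): …
  let st := (PySem.List.sorted word.toList (fun c => c) false).foldl pvStepB (0, 0, none)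
  -- return best <= (len(word) + 1) // 2
  decide (st.1 ≤ PySem.Int.floordiv (PySem.Str.len word + 1) 2)

-- ===== PRECONDITION & SPEC =====
-- Pre_ excludes the empty string, on which A raises ValueError (max of an empty sequence).
def Pre_can_rearrange (word : String) : Prop := word ≠ ""
instance (word : String) : Decidable (Pre_can_rearrange word) := by unfold Pre_can_rearrange; infer_instance
def pvWitness_can_rearrange : String := "aab"

-- On the empty string A raises ValueError; B's run scan naturally returns True there.
def Raises_can_rearrange (word : String) : Prop := word = ""
instance (word : String) : Decidable (Raises_can_rearrange word) := by unfold Raises_can_rearrange; infer_instance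
def pvRaiseWitness_can_rearrange : String := ""
def pvRaiseWitnessOut_can_rearrange : Bool := true

def Spec_can_rearrange (word : String) (out : Bool) : Prop := out = can_rearrange_alt word
instance (word : String) (out : Bool) : Decidable (Spec_can_rearrange word out) := by unfold Spec_can_rearrange; infer_instance

-- ===== CLAIM (what is proved, stated in full; the proofs are below) =====
def Claim_equal_can_rearrange : Prop := ∀ (word : String), Dom_can_rearrange word → Pre_can_rearrange word → Spec_can_rearrange word (can_rearrange word)
def Claim_raises_can_rearrange : Prop := (∀ (word : String), Dom_can_rearrange word → Raises_can_rearrange word → ¬ Pre_can_rearrange word) ∧ (Dom_can_rearrange (pvRaiseWitness_can_rearrange) ∧ Raises_can_rearrange (pvRaiseWitness_can_rearrange) ∧ can_rearrange_alt (pvRaiseWitness_can_rearrange) = pvRaiseWitnessOut_can_rearrange)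

-- ===== LEMMAS AND PROOFS =====

-- A's counting loop builds exactly Counter(word)
theorem pv_fold_eq_counter (l : List Char) :
    l.foldl (fun d c => if d.contains c then d.modify c 0 (fun v => v + 1) else d.insert c 1)
      (PySem.Dict.empty : PySem.Dict Char Int)
    = PySem.Dict.counter l := by
  rw [PySem.Dict.counter_eq_foldl]
  congr 1
  funext d c
  by_cases h : d.contains c = true
  · simp [h]
  · rw [Bool.not_eq_true] at h
    have hg : d.getD c 0 = 0 := by
      simp only [PySem.Dict.contains, List.any_eq_false] at h
      simp only [PySem.Dict.getD, PySem.Dict.get?]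
      rw [List.find?_eq_none.mpr]
      · rfl
      · intro p hp; exact h p hp
    simp [h, PySem.Dict.modify, hg]

-- Invariant of B's run scan over the (sorted) remainder: the best so far is a count
-- attained in the processed prefix p and bounds every count of p; prev is the max of p
-- and run its count. The final best then attains and bounds every count of p ++ rest.
theorem pv_scan_inv (rest : List Char) (p : List Char) (a : Char) (best : Int)
    (hs : (p ++ rest).Pairwise (· ≤ ·)) (ha : a ∈ p) (hmax : ∀ x ∈ p, x ≤ a)
    (hex : ∃ d ∈ p, best = (p.count d : Int))
    (hub : ∀ d ∈ p, (p.count d : Int) ≤ best) :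
    (∃ d ∈ p ++ rest, (rest.foldl pvStepB (best, (p.count a : Int), some a)).1 = ((p ++ rest).count d : Int)) ∧
    (∀ d ∈ p ++ rest, ((p ++ rest).count d : Int) ≤ (rest.foldl pvStepB (best, (p.count a : Int), some a)).1) := by
  induction rest generalizing p a best with
  | nil => simpa using ⟨hex, hub⟩
  | cons c rest ih =>
    have hle : ∀ x ∈ p, x ≤ c := by
      intro x hx
      have := (List.pairwise_append.mp hs).2.2 x hx c (by simp)
      exact this
    by_cases hac : a = c
    · -- same character: extend the run
      subst hac
      have hstep : pvStepB (best, (p.count a : Int), some a) a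
          = ((if best < (p.count a : Int) + 1 then (p.count a : Int) + 1 else best),
             (p.count a : Int) + 1, some a) := by
        simp [pvStepB]
      have hcount : ((p ++ [a]).count a : Int) = (p.count a : Int) + 1 := by
        simp [List.count_append]
      have hs' : ((p ++ [a]) ++ rest).Pairwise (· ≤ ·) := by
        simpa [List.append_assoc] using hs
      have hmax' : ∀ x ∈ p ++ [a], x ≤ a := by
        intro x hx
        rcases List.mem_append.mp hx with h | h
        · exact hmax x h
        · simp at h; simp [h]
      have hex' : ∃ d ∈ p ++ [a],
          (if best < (p.count a : Int) + 1 then (p.count a : Int) + 1 else best)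
            = ((p ++ [a]).count d : Int) := by
        by_cases hb : best < (p.count a : Int) + 1
        · exact ⟨a, by simp, by rw [if_pos hb, hcount]⟩
        · obtain ⟨d, hd, hbd⟩ := hex
          have hdc : d ≠ a := by
            intro h; subst h; omega
          refine ⟨d, by simp [hd], ?_⟩
          rw [if_neg hb, hbd]
          simp [List.count_append, Ne.symm hdc]
      have hub' : ∀ d ∈ p ++ [a], ((p ++ [a]).count d : Int)
            ≤ (if best < (p.count a : Int) + 1 then (p.count a : Int) + 1 else best) := by
        intro d hd
        by_cases hdc : d = a
        · subst hdc
          rw [hcount]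
          split <;> [omega; omega]
        · have hdp : d ∈ p := by
            rcases List.mem_append.mp hd with h | h
            · exact h
            · simp at h; exact absurd h hdc
          have : ((p ++ [a]).count d : Int) = (p.count d : Int) := by
            simp [List.count_append, Ne.symm hdc]
          rw [this]
          have := hub d hdp
          split <;> omega
      have := ih (p ++ [a]) a
        (if best < (p.count a : Int) + 1 then (p.count a : Int) + 1 else best)
        hs' (by simp) hmax' hex' hub'
      rw [← hcount] at this
      simpa [List.foldl_cons, hstep, hcount, List.append_assoc] using this
    · -- new character: start a fresh run of length 1
      have hcnp : c ∉ p := by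
        intro hcp
        exact hac (le_antisymm (hle a ha) (hmax c hcp))
      have hstep : pvStepB (best, (p.count a : Int), some a) c
          = ((if best < 1 then 1 else best), 1, some c) := by
        have : (some a = some c) = False := by simp [hac]
        simp [pvStepB, this]
      have hcount : ((p ++ [c]).count c : Int) = 1 := by
        simp [List.count_append, List.count_eq_zero_of_not_mem hcnp]
      have hs' : ((p ++ [c]) ++ rest).Pairwise (· ≤ ·) := by
        simpa [List.append_assoc] using hs
      have hmax' : ∀ x ∈ p ++ [c], x ≤ c := by
        intro x hx
        rcases List.mem_append.mp hx with h | h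
        · exact hle x h
        · simp at h; simp [h]
      have hex' : ∃ d ∈ p ++ [c], (if best < (1:Int) then (1:Int) else best)
            = ((p ++ [c]).count d : Int) := by
        by_cases hb : best < (1:Int)
        · exact ⟨c, by simp, by rw [if_pos hb, hcount]⟩
        · obtain ⟨d, hd, hbd⟩ := hex
          have hdc : d ≠ c := fun h => hcnp (h ▸ hd)
          refine ⟨d, by simp [hd], ?_⟩
          rw [if_neg hb, hbd]
          simp [List.count_append, Ne.symm hdc]
      have hub' : ∀ d ∈ p ++ [c], ((p ++ [c]).count d : Int)
            ≤ (if best < (1:Int) then (1:Int) else best) := by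
        intro d hd
        by_cases hdc : d = c
        · subst hdc
          rw [hcount]; split <;> omega
        · have hdp : d ∈ p := by
            rcases List.mem_append.mp hd with h | h
            · exact h
            · simp at h; exact absurd h hdc
          have : ((p ++ [c]).count d : Int) = (p.count d : Int) := by
            simp [List.count_append, Ne.symm hdc]
          rw [this]
          have := hub d hdp
          split <;> omega
      have := ih (p ++ [c]) c (if best < (1:Int) then (1:Int) else best)
        hs' (by simp) hmax' hex' hub'
      rw [show ((p ++ [c]).count c : Int) = 1 from hcount] at this
      simpa [List.foldl_cons, hstep, List.append_assoc] using this

-- B's final best attains and bounds every character count of word.toList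
theorem pv_scan_spec (l : List Char) (h : l ≠ []) :
    (∃ d ∈ l, ((PySem.List.sorted l (fun c => c) false).foldl pvStepB (0, 0, none)).1 = (l.count d : Int)) ∧
    (∀ d ∈ l, (l.count d : Int) ≤ ((PySem.List.sorted l (fun c => c) false).foldl pvStepB (0, 0, none)).1) := by
  have hperm : (PySem.List.sorted l (fun c => c) false).Perm l :=
    PySem.List.sorted_perm l (fun c => c) false
  have hpw : (PySem.List.sorted l (fun c => c) false).Pairwise (· ≤ ·) :=
    PySem.List.sorted_pairwise l (fun c => c)
  cases hseq : PySem.List.sorted l (fun c => c) false with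
  | nil =>
    rw [hseq] at hperm
    exact absurd hperm.symm.eq_nil h
  | cons c rest =>
    rw [hseq] at hperm hpw
    have hstep1 : pvStepB (0, 0, none) c = (1, 1, some c) := by simp [pvStepB]
    have hinv := pv_scan_inv rest [c] c 1
      (by simpa using hpw) (by simp) (by simp) ⟨c, by simp⟩ (by simp)
    rw [show (([c] : List Char).count c : Int) = 1 by simp] at hinv
    simp only [List.singleton_append] at hinv
    have hcnt : ∀ d : Char, (c :: rest).count d = l.count d := fun d => hperm.count_eq d
    constructor
    · obtain ⟨d, hd, hbd⟩ := hinv.1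
      refine ⟨d, hperm.mem_iff.mp hd, ?_⟩
      rw [List.foldl_cons, hstep1, hbd, hcnt d]
    · intro d hd
      rw [List.foldl_cons, hstep1]
      have := hinv.2 d (hperm.mem_iff.mpr hd)
      rwa [hcnt d] at this

-- ===== VERDICT (by name: the statement is the Claim_ definition above) =====
theorem can_rearrange_spec : Claim_equal_can_rearrange := by
  intro word _ hpre
  have hl : word.toList ≠ [] := by
    intro h
    exact hpre (by cases word; simp_all)
  unfold Spec_can_rearrange can_rearrange can_rearrange_alt
  have hv : (PySem.Dict.counter word.toList).values
      = (PySem.Set.ofList word.toList).map (fun c => (List.count c word.toList : Int)) := by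
    simp [PySem.Dict.values, PySem.Dict.items_counter, List.map_map, Function.comp]
  -- A's max exists since the word is nonempty
  obtain ⟨c0, hc0⟩ : ∃ c, c ∈ word.toList := List.exists_mem_of_ne_nil _ hl
  have hvne : (PySem.Dict.counter word.toList).values ≠ [] := by
    rw [hv]
    intro hnil
    have : c0 ∈ PySem.Set.ofList word.toList := (PySem.Set.mem_ofList _ _).mpr hc0
    rw [List.map_eq_nil_iff.mp hnil] at this
    simp at this
  obtain ⟨m, hm⟩ : ∃ m, PySem.List.max? (PySem.Dict.counter word.toList).values (fun v => v) = some m := by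
    cases hcase : PySem.List.max? (PySem.Dict.counter word.toList).values (fun v => v) with
    | none => exact absurd ((PySem.List.max?_eq_none_iff _ _).mp hcase) hvne
    | some m => exact ⟨m, rfl⟩
  -- the two maxima coincide
  obtain ⟨hex, hub⟩ := pv_scan_spec word.toList hl
  have hbm : ((PySem.List.sorted word.toList (fun c => c) false).foldl pvStepB (0, 0, none)).1 = m := by
    obtain ⟨d, hd, hbd⟩ := hex
    apply le_antisymm
    · -- best is one of A's values
      have hdv : (word.toList.count d : Int) ∈ (PySem.Dict.counter word.toList).values := by
        rw [hv]
        exact List.mem_map.mpr ⟨d, (PySem.Set.mem_ofList _ _).mpr hd, rfl⟩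
      rw [hbd]
      exact PySem.List.max?_isMax hm _ hdv
    · -- A's max is one of the counts, bounded by best
      have hmmem := PySem.List.max?_mem hm
      rw [hv] at hmmem
      obtain ⟨k, hk, hkm⟩ := List.mem_map.mp hmmem
      rw [← hkm]
      exact hub k ((PySem.Set.mem_ofList _ _).mp hk)
  simp only [pv_fold_eq_counter, hm, hbm]

theorem can_rearrange_raises : Claim_raises_can_rearrange := by
  unfold Claim_raises_can_rearrange
  constructor
  · intro word _ hr
    simp [Pre_can_rearrange, Raises_can_rearrange] at *
    exact hr
  · exact ⟨by decide, by decide, by decide⟩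

-- self-check: B's port indeed returns the stated value at the raise witness
theorem pvRaiseWitness_ok :
    can_rearrange_alt pvRaiseWitness_can_rearrange = pvRaiseWitnessOut_can_rearrange := by
  have h := can_rearrange_raises
  unfold Claim_raises_can_rearrange at h
  exact h.2.2.2
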